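-- pv_equiv track=rewrite | github.com/addinkevin/programmingchallenges | HackerRank/InterviewPreparationKit/Miscellaneous/friendCircleQueries.py | friendCircleQueries
-- ===== SOURCE A (Python) =====
-- from collections import defaultdict
--
-- class UnionFind:
--     def __init__(self):
--         self.components = defaultdict(lambda: None)
--         self.sizes = defaultdict(lambda: 1)
--
--     def _find(self, u):
--         while self.components[u]:
--             u = self.components[u]
--         return u
--
--     def find(self, u):
--         if not self.components[u]:
--             return u
--
--         root = self._find(u)
--         self.components[u] = root
--         return root
--
--     def getSizeComponent(self, u):
--         return self.sizes[self.find(u)]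
--
--     def union(self, u, v):
--         pointerU = self.find(u)
--         pointerV = self.find(v)
--         if pointerU == pointerV:  # same component
--             return self.sizes[pointerU]
--
--         componentUSize = self.sizes[pointerU]
--         componentVSize = self.sizes[pointerV]
--         if componentUSize > componentVSize:
--             self.components[pointerV] = pointerU
--             newComponentPointer = pointerU
--         else:
--             self.components[pointerU] = pointerV
--             newComponentPointer = pointerV
--
--         newSize = componentUSize + componentVSize
--         self.sizes[newComponentPointer] = newSize
--         return newSize
--
-- def friendCircleQueries(queries):
--     unionFind = UnionFind()
--     maxComponentSize = 1
--
--     output = []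
--     for query in queries:
--         newComponentSize = unionFind.union(query[0], query[1])
--         if newComponentSize > maxComponentSize:
--             maxComponentSize = newComponentSize
--         output.append(maxComponentSize)
--
--     return output
-- ===== SOURCE B (Python) =====
-- def friendCircleQueries(queries):
--     # Flat union-find: comp maps a node to its component id (a representative
--     # node; absent = the node itself), size maps an id to its component size
--     # (absent = 1).  A merge repaints every entry of the losing class instead
--     # of chasing parent pointers.
--     comp = {}
--     size = {}
--     best = 1
--     out = []
--     for q in queries:
--         cu = comp.get(q[0], q[0])
--         cv = comp.get(q[1], q[1])
--         if cu == cv: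
--             s = size.get(cu, 1)
--         else:
--             su = size.get(cu, 1)
--             sv = size.get(cv, 1)
--             win, lose = (cu, cv) if su > sv else (cv, cu)
--             for x in list(comp):
--                 if comp[x] == lose:
--                     comp[x] = win
--             comp[lose] = win
--             s = su + sv
--             size[win] = s
--         if s > best:
--             best = s
--         out.append(best)
--     return out
-- ===== Notes on version B (the rewrite author's own statement) =====
-- stated objective: simpler
-- what changed: Replaced the parent-pointer union-find (iterative root chasing with path compression and a sizes dict keyed by roots) by a flat node->component-id dict: a merge repaints every entry of the losing class in one scan, so there is no find, no pointer chasing and no compression.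
-- outside the precondition, e.g. on friendCircleQueries([[1, 0], [0, 2], [2, 3]]): A returns [2, 3, 3], B returns [2, 3, 4]
import Mathlib
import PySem

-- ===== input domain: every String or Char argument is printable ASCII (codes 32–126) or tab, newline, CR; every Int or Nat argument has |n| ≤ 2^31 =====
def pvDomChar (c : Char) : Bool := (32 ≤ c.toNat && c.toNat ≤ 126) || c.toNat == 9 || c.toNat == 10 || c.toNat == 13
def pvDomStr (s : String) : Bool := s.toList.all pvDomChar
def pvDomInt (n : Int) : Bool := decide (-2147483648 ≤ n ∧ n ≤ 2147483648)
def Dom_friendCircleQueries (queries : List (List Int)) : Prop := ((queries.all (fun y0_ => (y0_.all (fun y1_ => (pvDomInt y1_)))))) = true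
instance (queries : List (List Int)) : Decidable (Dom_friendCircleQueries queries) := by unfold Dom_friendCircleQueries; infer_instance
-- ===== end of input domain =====

-- B replaces A's parent-pointer union-find (root chasing + path compression) by a flat
-- node → component-id dict whose merges repaint the losing class in one scan (objective:
-- simpler). Equivalence is proved on the problem's natural domain (Pre_): queries of
-- length ≥ 2 whose two endpoints are nonzero person ids.

-- ===== PORT A =====
-- A's dicts: components = defaultdict(lambda: None) is modelled as PySem.Dict Int Int in
-- which an absent key reads as 0 — exact, because Python only ever stores ints in it, the
-- code branches on TRUTHINESS ('while self.components[u]:'), and None and 0 are equally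
-- falsy; sizes = defaultdict(lambda: 1) reads via getD _ 1.
-- A's `while self.components[u]:` loop in _find is ported with explicit fuel
-- (queries.length + 1): parent chains hold at most one edge per processed union, so the
-- fuel is never exhausted; on fuel 0 it returns the current node.
def fcqFindLoop (parent : PySem.Dict Int Int) : Nat → Int → Int
  | 0, u => u
  | fuel + 1, u =>
      let p := parent.getD u 0
      if p ≠ 0 then fcqFindLoop parent fuel p else u

-- UnionFind.find: early return for a falsy parent, else chase and path-compress u.
def fcqFindC (parent : PySem.Dict Int Int) (fuel : Nat) (u : Int) :
    Int × PySem.Dict Int Int :=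
  if parent.getD u 0 = 0 then (u, parent)
  else
    let root := fcqFindLoop parent fuel u
    (root, parent.insert u root)

-- UnionFind.union, returning (newSize, components, sizes).
def fcqUnion (fuel : Nat) (parent sizes : PySem.Dict Int Int) (u v : Int) :
    Int × PySem.Dict Int Int × PySem.Dict Int Int :=
  let fu := fcqFindC parent fuel u
  let fv := fcqFindC fu.2 fuel v
  let pu := fu.1
  let pv := fv.1
  if pu = pv then (sizes.getD pu 1, fv.2, sizes)
  else
    let su := sizes.getD pu 1
    let sv := sizes.getD pv 1
    if su > sv then
      (su + sv, fv.2.insert pv pu, sizes.insert pu (su + sv))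
    else
      (su + sv, fv.2.insert pu pv, sizes.insert pv (su + sv))

-- one iteration of A's main loop; state = ((components, sizes), maxComponentSize, output)
def fcqStepA (fuel : Nat)
    (st : (PySem.Dict Int Int × PySem.Dict Int Int) × Int × List Int)
    (q : List Int) : (PySem.Dict Int Int × PySem.Dict Int Int) × Int × List Int :=
  let u := (PySem.List.pyGet? q 0).getD 0   -- query[0] (Pre_ keeps the index in range)
  let v := (PySem.List.pyGet? q 1).getD 0   -- query[1]
  let r := fcqUnion fuel st.1.1 st.1.2 u v
  let best := if r.1 > st.2.1 then r.1 else st.2.1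
  ((r.2.1, r.2.2), best, st.2.2 ++ [best])

def friendCircleQueries (queries : List (List Int)) : List Int :=
  (queries.foldl (fcqStepA (queries.length + 1))
    ((PySem.Dict.empty, PySem.Dict.empty), 1, [])).2.2

-- ===== PORT B =====
-- Source B's repaint loop: 'for x in list(comp): if comp[x] == lose: comp[x] = win'
def fcqRepaint (comp : PySem.Dict Int Int) (lose win : Int) : PySem.Dict Int Int :=
  comp.items.foldl (fun d p => if p.2 = lose then d.insert p.1 win else d) comp

-- one iteration of Source B's loop; state = ((comp, size), best, out)
def fcqStepB (st : (PySem.Dict Int Int × PySem.Dict Int Int) × Int × List Int)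
    (q : List Int) : (PySem.Dict Int Int × PySem.Dict Int Int) × Int × List Int :=
  let u := (PySem.List.pyGet? q 0).getD 0   -- q[0]
  let v := (PySem.List.pyGet? q 1).getD 0   -- q[1]
  let comp := st.1.1
  let size := st.1.2
  let cu := comp.getD u u                    -- comp.get(q[0], q[0])
  let cv := comp.getD v v
  if cu = cv then
    let s := size.getD cu 1
    let best := if s > st.2.1 then s else st.2.1
    ((comp, size), best, st.2.2 ++ [best])
  else
    let su := size.getD cu 1
    let sv := size.getD cv 1
    let win := if su > sv then cu else cv
    let lose := if su > sv then cv else cu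
    let comp' := (fcqRepaint comp lose win).insert lose win
    let s := su + sv
    let size' := size.insert win s
    let best := if s > st.2.1 then s else st.2.1
    ((comp', size'), best, st.2.2 ++ [best])

def friendCircleQueries_alt (queries : List (List Int)) : List Int :=
  (queries.foldl fcqStepB ((PySem.Dict.empty, PySem.Dict.empty), 1, [])).2.2

-- ===== PRECONDITION & SPEC =====
-- Pre_ excludes queries shorter than two entries, on which A raises IndexError, and
-- queries whose endpoints include person id 0: the HackerRank problem's ids are 1-based,
-- and A's parent encoding reserves falsy values (None/0) for 'no parent', so id 0 lies
-- outside the representation's natural domain.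
def Pre_friendCircleQueries (queries : List (List Int)) : Prop :=
  ∀ q ∈ queries, 2 ≤ q.length ∧ q.getD 0 0 ≠ 0 ∧ q.getD 1 0 ≠ 0
instance (queries : List (List Int)) : Decidable (Pre_friendCircleQueries queries) := by
  unfold Pre_friendCircleQueries; infer_instance

def pvWitness_friendCircleQueries : List (List Int) := [[1, 2], [3, 4], [2, 3]]

def Spec_friendCircleQueries (queries : List (List Int)) (out : List Int) : Prop :=
  out = friendCircleQueries_alt queries
instance (queries : List (List Int)) (out : List Int) :
    Decidable (Spec_friendCircleQueries queries out) := by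
  unfold Spec_friendCircleQueries; infer_instance

-- ===== CLAIM (what is proved, stated in full; the proofs are below) =====
def Claim_equal_friendCircleQueries : Prop :=
  ∀ (queries : List (List Int)), Dom_friendCircleQueries queries →
    Pre_friendCircleQueries queries →
    Spec_friendCircleQueries queries (friendCircleQueries queries)

-- ===== LEMMAS AND PROOFS =====

-- B's resolved component id of a node
def fcqResolve (comp : PySem.Dict Int Int) (x : Int) : Int := comp.getD x x

-- x reaches the root r in exactly n parent steps of A's forest
inductive FcqRootsTo (parent : PySem.Dict Int Int) : Int → Int → Nat → Prop
  | root (x : Int) (h : parent.getD x 0 = 0) : FcqRootsTo parent x x 0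
  | step (x p r : Int) (n : Nat) (hp : parent.getD x 0 = p) (hnz : p ≠ 0)
      (ht : FcqRootsTo parent p r n) : FcqRootsTo parent x r (n + 1)

theorem fcqRootsTo_root_getD {parent : PySem.Dict Int Int} {x r : Int} {n : Nat}
    (h : FcqRootsTo parent x r n) : parent.getD r 0 = 0 := by
  induction h with
  | root _ h => exact h
  | step _ _ _ _ _ _ _ ih => exact ih

theorem fcqRootsTo_unique {parent : PySem.Dict Int Int} {x r s : Int} {n k : Nat}
    (h1 : FcqRootsTo parent x r n) (h2 : FcqRootsTo parent x s k) : r = s := by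
  induction h1 generalizing s k with
  | root x h =>
      cases h2 with
      | root _ _ => rfl
      | step _ p _ _ hp hnz _ => exact absurd (hp ▸ h) hnz
  | step x p r n hp hnz ht ih =>
      cases h2 with
      | root _ h => exact absurd (hp ▸ h) hnz
      | step _ p' _ _ hp' _ ht' =>
          have hpp : p = p' := by rw [← hp, ← hp']
          exact ih (hpp ▸ ht')

theorem fcqFindLoop_eq {parent : PySem.Dict Int Int} {x r : Int} {n : Nat}
    (h : FcqRootsTo parent x r n) : ∀ fuel, n ≤ fuel → fcqFindLoop parent fuel x = r := by
  induction h with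
  | root x h =>
      intro fuel _
      cases fuel with
      | zero => rfl
      | succ f => simp [fcqFindLoop, h]
  | step x p r n hp hnz ht ih =>
      intro fuel hf
      cases fuel with
      | zero => omega
      | succ f => simpa [fcqFindLoop, hp, hnz] using ih f (by omega)

-- path compression: inserting the shortcut u ↦ r (r the root of u, reached in ≥ 1 steps)
-- preserves every node's root without lengthening any chain
theorem fcqRootsTo_compress {parent : PySem.Dict Int Int} {u r : Int} {nu : Nat}
    (hu : FcqRootsTo parent u r nu) (hnu : 1 ≤ nu) (hrnz : r ≠ 0) :
    ∀ x s n, FcqRootsTo parent x s n → ∃ k ≤ n, FcqRootsTo (parent.insert u r) x s k := by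
  have hune : parent.getD u 0 ≠ 0 := by
    cases hu with
    | root _ h => omega
    | step _ p _ _ hp hnz _ => exact hp ▸ hnz
  have hroot : parent.getD r 0 = 0 := fcqRootsTo_root_getD hu
  have hru : r ≠ u := fun h => hune (h ▸ hroot)
  intro x s n h
  induction h with
  | root x h =>
      have hxu : x ≠ u := fun he => hune (he ▸ h)
      exact ⟨0, le_refl 0, FcqRootsTo.root x (by rw [PySem.Dict.getD_insert, if_neg hxu]; exact h)⟩
  | step x p s n hp hnz ht ih =>
      by_cases hxu : x = u
      · subst hxu
        have hs : s = r := fcqRootsTo_unique (FcqRootsTo.step _ _ _ _ hp hnz ht) hu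
        subst hs
        refine ⟨1, by omega, FcqRootsTo.step x s s 0 ?_ hrnz (FcqRootsTo.root s ?_)⟩
        · rw [PySem.Dict.getD_insert, if_pos rfl]
        · rw [PySem.Dict.getD_insert, if_neg hru]; exact hroot
      · obtain ⟨k, hk, h'⟩ := ih
        exact ⟨k + 1, by omega,
          FcqRootsTo.step x p s k (by simp [PySem.Dict.getD_insert, hxu, hp]) hnz h'⟩

-- linking two roots: parent.insert lose win re-roots the lose-class onto win
theorem fcqRootsTo_link {parent : PySem.Dict Int Int} {lose win : Int}
    (hl : parent.getD lose 0 = 0) (hw : parent.getD win 0 = 0)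
    (hlw : lose ≠ win) (hwnz : win ≠ 0) :
    ∀ x s n, FcqRootsTo parent x s n →
      ∃ k ≤ n + 1, FcqRootsTo (parent.insert lose win) x (if s = lose then win else s) k := by
  intro x s n h
  induction h with
  | root x h =>
      by_cases hx : x = lose
      · subst hx
        rw [if_pos rfl]
        refine ⟨1, by omega, FcqRootsTo.step x win win 0 ?_ hwnz (FcqRootsTo.root win ?_)⟩
        · rw [PySem.Dict.getD_insert, if_pos rfl]
        · rw [PySem.Dict.getD_insert, if_neg (fun h => hlw h.symm)]; exact hw
      · simp only [if_neg hx]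
        exact ⟨0, by omega, FcqRootsTo.root x (by simp [PySem.Dict.getD_insert, hx, h])⟩
  | step x p s n hp hnz ht ih =>
      have hxl : x ≠ lose := fun he => hnz (by rw [← hp, he, hl])
      obtain ⟨k, hk, h'⟩ := ih
      exact ⟨k + 1, by omega,
        FcqRootsTo.step x p _ k (by simp [PySem.Dict.getD_insert, hxl, hp]) hnz h'⟩

-- the repaint fold, characterised on get?
theorem fcqRepaint_fold_get? (lose win : Int) :
    ∀ (l : List (Int × Int)) (e : PySem.Dict Int Int), (l.map Prod.fst).Nodup →
      ∀ x, (l.foldl (fun d p => if p.2 = lose then d.insert p.1 win else d) e).get? x =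
        if (x, lose) ∈ l then some win else e.get? x := by
  intro l
  induction l with
  | nil => intro e _ x; simp
  | cons hd t ih =>
      obtain ⟨k1, c1⟩ := hd
      intro e hnd x
      simp only [List.map_cons, List.nodup_cons] at hnd
      obtain ⟨hhd, hnd'⟩ := hnd
      simp only [List.foldl_cons]
      rw [ih _ hnd']
      by_cases hmem : (x, lose) ∈ t
      · simp [hmem, List.mem_cons]
      · by_cases hc : c1 = lose
        · by_cases hx : x = k1
          · subst hx; subst hc
            simp [hmem]  -- get? at the just-written key
          · have hne : ¬ (x, lose) = (k1, c1) := fun he => hx (congrArg Prod.fst he)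
            simp only [if_pos hc, List.mem_cons, hmem, hne, or_false, if_false]
            rw [PySem.Dict.get?_insert]
            simp [hx]
        · have hne : ¬ (x, lose) = (k1, c1) := fun he => hc (congrArg Prod.snd he).symm
          simp [hc, hmem, hne]

-- repaint keeps the key list duplicate-free
theorem fcqRepaint_fold_nodup (lose win : Int) :
    ∀ (l : List (Int × Int)) (e : PySem.Dict Int Int), e.keys.Nodup →
      ((l.foldl (fun d p => if p.2 = lose then d.insert p.1 win else d) e)).keys.Nodup := by
  intro l
  induction l with
  | nil => intro e h; simpa using h
  | cons hd t ih =>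
      intro e h
      simp only [List.foldl_cons]
      by_cases hc : hd.2 = lose
      · simp only [if_pos hc]
        exact ih _ (PySem.Dict.nodup_keys_insert _ _ _ h)
      · simp only [if_neg hc]
        exact ih _ h

-- ===== the invariant tying A's forest to B's flat map =====
structure FcqInv (parent sizes comp size : PySem.Dict Int Int) (m : Nat) : Prop where
  nodup : comp.keys.Nodup
  vals : ∀ x c, comp.get? x = some c → fcqResolve comp c = c ∧ c ≠ x ∧ c ≠ 0
  roots : ∀ x, ∃ n ≤ m, FcqRootsTo parent x (fcqResolve comp x) n
  sizes_eq : ∀ r, fcqResolve comp r = r → sizes.getD r 1 = size.getD r 1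

theorem fcqResolve_idem {comp : PySem.Dict Int Int}
    (hvals : ∀ x c, comp.get? x = some c → fcqResolve comp c = c ∧ c ≠ x ∧ c ≠ 0) (x : Int) :
    fcqResolve comp (fcqResolve comp x) = fcqResolve comp x := by
  cases h : comp.get? x with
  | none => simp [fcqResolve, PySem.Dict.getD_eq_get?_getD, h]
  | some c =>
      have := (hvals x c h).1
      simpa [fcqResolve, PySem.Dict.getD_eq_get?_getD, h] using this

theorem fcqResolve_nz {comp : PySem.Dict Int Int}
    (hvals : ∀ x c, comp.get? x = some c → fcqResolve comp c = c ∧ c ≠ x ∧ c ≠ 0)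
    {x : Int} (hx : x ≠ 0) : fcqResolve comp x ≠ 0 := by
  cases h : comp.get? x with
  | none => simpa [fcqResolve, PySem.Dict.getD_eq_get?_getD, h] using hx
  | some c =>
      have := (hvals x c h).2.2
      simpa [fcqResolve, PySem.Dict.getD_eq_get?_getD, h] using this

-- A's find (with compression) returns B's component id and preserves the invariant's forest
theorem fcqFindC_spec {parent comp : PySem.Dict Int Int} {m fuel : Nat} {u : Int}
    (hroots : ∀ x, ∃ n ≤ m, FcqRootsTo parent x (fcqResolve comp x) n)
    (hvals : ∀ x c, comp.get? x = some c → fcqResolve comp c = c ∧ c ≠ x ∧ c ≠ 0)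
    (hfuel : m < fuel) (hu : u ≠ 0) :
    (fcqFindC parent fuel u).1 = fcqResolve comp u ∧
    ∀ x, ∃ n ≤ m, FcqRootsTo (fcqFindC parent fuel u).2 x (fcqResolve comp x) n := by
  obtain ⟨nu, hnu, Hu⟩ := hroots u
  generalize hgc : fcqResolve comp u = cu at Hu
  by_cases h0 : parent.getD u 0 = 0
  · have hcu : cu = u := fcqRootsTo_unique Hu (FcqRootsTo.root u h0)
    constructor
    · simp [fcqFindC, h0, hcu]
    · simpa [fcqFindC, h0] using hroots
  · have hnu1 : 1 ≤ nu := by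
      cases Hu with
      | root _ h => exact absurd h h0
      | step _ _ _ _ _ _ _ => omega
    have hloop : fcqFindLoop parent fuel u = cu :=
      fcqFindLoop_eq Hu fuel (by omega)
    have hrnz : cu ≠ 0 := hgc ▸ fcqResolve_nz hvals hu
    constructor
    · simp [fcqFindC, h0, hloop]
    · intro x
      obtain ⟨n, hn, Hx⟩ := hroots x
      obtain ⟨k, hk, H'⟩ := fcqRootsTo_compress Hu hnu1 hrnz x _ n Hx
      refine ⟨k, by omega, ?_⟩
      simpa [fcqFindC, h0, hloop] using H'

-- merging two distinct classes: A's link + B's repaint produce related states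
theorem fcq_merge_inv {parent2 sizes comp size : PySem.Dict Int Int} {m : Nat}
    {win lose ns : Int}
    (hnodup : comp.keys.Nodup)
    (hvals : ∀ x c, comp.get? x = some c → fcqResolve comp c = c ∧ c ≠ x ∧ c ≠ 0)
    (hroots2 : ∀ x, ∃ n ≤ m, FcqRootsTo parent2 x (fcqResolve comp x) n)
    (hsz : ∀ r, fcqResolve comp r = r → sizes.getD r 1 = size.getD r 1)
    (hwin : fcqResolve comp win = win) (hlose : fcqResolve comp lose = lose)
    (hwl : win ≠ lose) (hwnz : win ≠ 0) :
    FcqInv (parent2.insert lose win) (sizes.insert win ns)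
           ((fcqRepaint comp lose win).insert lose win) (size.insert win ns) (m + 1) := by
  have hitems_nodup : (comp.items.map Prod.fst).Nodup := hnodup
  have hlose_none : comp.get? lose = none := by
    cases h : comp.get? lose with
    | none => rfl
    | some c =>
        have h2 := hvals lose c h
        have hc : c = lose := by
          simpa [fcqResolve, PySem.Dict.getD_eq_get?_getD, h] using hlose
        exact absurd hc h2.2.1
  have hwin_none : comp.get? win = none := by
    cases h : comp.get? win with
    | none => rfl
    | some c =>
        have h2 := hvals win c h
        have hc : c = win := by
          simpa [fcqResolve, PySem.Dict.getD_eq_get?_getD, h] using hwin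
        exact absurd hc h2.2.1
  have hG : ∀ x, ((fcqRepaint comp lose win).insert lose win).get? x =
      if x = lose then some win else
        if comp.get? x = some lose then some win else comp.get? x := by
    intro x
    rw [PySem.Dict.get?_insert]
    by_cases hx : x = lose
    · simp [hx]
    · simp only [if_neg hx]
      show (comp.items.foldl (fun d p => if p.2 = lose then d.insert p.1 win else d) comp).get? x = _
      rw [fcqRepaint_fold_get? lose win comp.items comp hitems_nodup x]
      by_cases hm : comp.get? x = some lose
      · simp [PySem.Dict.mem_items_of_get?_eq_some comp hm, hm]
      · have hnm : (x, lose) ∉ comp.items :=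
          fun hmem => hm (PySem.Dict.get?_of_mem_items comp hmem hnodup)
        simp [hnm, hm]
  have hR : ∀ x, fcqResolve ((fcqRepaint comp lose win).insert lose win) x =
      if fcqResolve comp x = lose then win else fcqResolve comp x := by
    intro x
    rw [fcqResolve, PySem.Dict.getD_eq_get?_getD, hG x]
    by_cases hx : x = lose
    · subst hx; simp [hlose]
    · simp only [if_neg hx]
      cases h : comp.get? x with
      | none =>
          have hrx : fcqResolve comp x = x := by
            simp [fcqResolve, PySem.Dict.getD_eq_get?_getD, h]
          simp [hrx, hx]
      | some c =>
          have hrx : fcqResolve comp x = c := by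
            simp [fcqResolve, PySem.Dict.getD_eq_get?_getD, h]
          by_cases hc : c = lose
          · simp [hc, hrx]
          · simp [hc, hrx]
  refine ⟨?_, ?_, ?_, ?_⟩
  · -- nodup
    refine PySem.Dict.nodup_keys_insert _ _ _ ?_
    show ((comp.items.foldl (fun d p => if p.2 = lose then d.insert p.1 win else d) comp)).keys.Nodup
    exact fcqRepaint_fold_nodup lose win comp.items comp hnodup
  · -- vals
    have hRwin : fcqResolve ((fcqRepaint comp lose win).insert lose win) win = win := by
      rw [hR win, hwin, if_neg hwl]
    intro x c hx
    rw [hG x] at hx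
    by_cases hx1 : x = lose
    · rw [if_pos hx1] at hx
      have hc : win = c := by injection hx
      rw [← hc, hx1]
      exact ⟨hRwin, hwl, hwnz⟩
    · rw [if_neg hx1] at hx
      by_cases hx2 : comp.get? x = some lose
      · rw [if_pos hx2] at hx
        have hc : win = c := by injection hx
        have hxw : win ≠ x := fun he => by
          rw [← he] at hx2; rw [hx2] at hwin_none; simp at hwin_none
        rw [← hc]
        exact ⟨hRwin, hxw, hwnz⟩
      · rw [if_neg hx2] at hx
        obtain ⟨h1, h2, h3⟩ := hvals x c hx
        have hcl : c ≠ lose := fun he => hx2 (he ▸ hx)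
        refine ⟨?_, h2, h3⟩
        rw [hR c, h1, if_neg hcl]
  · -- roots
    intro x
    obtain ⟨n, hn, H⟩ := hroots2 x
    have hlr : parent2.getD lose 0 = 0 := by
      obtain ⟨k, _, Hl⟩ := hroots2 lose
      rw [hlose] at Hl
      exact fcqRootsTo_root_getD Hl
    have hwr : parent2.getD win 0 = 0 := by
      obtain ⟨k, _, Hw⟩ := hroots2 win
      rw [hwin] at Hw
      exact fcqRootsTo_root_getD Hw
    obtain ⟨k, hk, H'⟩ := fcqRootsTo_link hlr hwr (fun he => hwl he.symm) hwnz x _ n H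
    refine ⟨k, by omega, ?_⟩
    rw [hR x]; exact H'
  · -- sizes
    intro r hr
    by_cases hrw : r = win
    · subst hrw; rw [PySem.Dict.getD_insert, if_pos rfl, PySem.Dict.getD_insert, if_pos rfl]
    · rw [hR r] at hr
      have hres : fcqResolve comp r = r := by
        by_cases hrl : fcqResolve comp r = lose
        · rw [if_pos hrl] at hr; exact absurd hr.symm hrw
        · rwa [if_neg hrl] at hr
      rw [PySem.Dict.getD_insert, PySem.Dict.getD_insert, if_neg hrw, if_neg hrw]
      exact hsz r hres

theorem fcq_step_eq (fuel m : Nat) (parent sizes comp size : PySem.Dict Int Int)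
    (best : Int) (out : List Int) (q : List Int)
    (hinv : FcqInv parent sizes comp size m) (hfuel : m < fuel)
    (hq : 2 ≤ q.length ∧ q.getD 0 0 ≠ 0 ∧ q.getD 1 0 ≠ 0) :
    (fcqStepA fuel ((parent, sizes), best, out) q).2.1 =
      (fcqStepB ((comp, size), best, out) q).2.1 ∧
    (fcqStepA fuel ((parent, sizes), best, out) q).2.2 =
      (fcqStepB ((comp, size), best, out) q).2.2 ∧
    FcqInv (fcqStepA fuel ((parent, sizes), best, out) q).1.1
           (fcqStepA fuel ((parent, sizes), best, out) q).1.2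
           (fcqStepB ((comp, size), best, out) q).1.1
           (fcqStepB ((comp, size), best, out) q).1.2 (m + 1) := by
  obtain ⟨hlen, h0, h1⟩ := hq
  match q, hlen with
  | a :: b :: t, _ =>
  have ha0 : a ≠ 0 := by simpa [List.getD] using h0
  have hb0 : b ≠ 0 := by simpa [List.getD] using h1
  have hua : (PySem.List.pyGet? (a :: b :: t) 0).getD 0 = a := by
    rw [PySem.List.pyGet?_zero_cons]; rfl
  have hvb : (PySem.List.pyGet? (a :: b :: t) 1).getD 0 = b := by
    rw [show ((1 : Int)) = ((1 : Nat) : Int) by norm_num, PySem.List.pyGet?_natCast]; rfl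
  have Hfu := fcqFindC_spec (fuel := fuel) (u := a) hinv.roots hinv.vals hfuel ha0
  have Hfv := fcqFindC_spec (fuel := fuel) (u := b) Hfu.2 hinv.vals hfuel hb0
  have hidu : fcqResolve comp (fcqResolve comp a) = fcqResolve comp a :=
    fcqResolve_idem hinv.vals a
  have hidv : fcqResolve comp (fcqResolve comp b) = fcqResolve comp b :=
    fcqResolve_idem hinv.vals b
  by_cases hcc : fcqResolve comp a = fcqResolve comp b
  · -- same component: A compresses only, B does nothing
    have hsz : sizes.getD (fcqResolve comp a) 1 = size.getD (fcqResolve comp a) 1 :=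
      hinv.sizes_eq _ hidu
    refine ⟨?_, ?_, ?_⟩
    · simp only [fcqStepA, fcqStepB, fcqUnion, hua, hvb, Hfu.1, Hfv.1, fcqResolve] at *
      simp only [hcc] at hsz
      simp [hcc, hsz]
    · simp only [fcqStepA, fcqStepB, fcqUnion, hua, hvb, Hfu.1, Hfv.1, fcqResolve] at *
      simp only [hcc] at hsz
      simp [hcc, hsz]
    · have hroots2 := Hfv.2
      simp only [fcqStepA, fcqStepB, fcqUnion, hua, hvb, Hfu.1, Hfv.1, fcqResolve] at *
      simp only [hcc, ite_true]
      refine ⟨hinv.nodup, hinv.vals, ?_, hinv.sizes_eq⟩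
      intro x
      obtain ⟨n, hn, H⟩ := hroots2 x
      exact ⟨n, by omega, H⟩
  · -- distinct components: merge
    have hsu : sizes.getD (fcqResolve comp a) 1 = size.getD (fcqResolve comp a) 1 :=
      hinv.sizes_eq _ hidu
    have hsv : sizes.getD (fcqResolve comp b) 1 = size.getD (fcqResolve comp b) 1 :=
      hinv.sizes_eq _ hidv
    have hanz : fcqResolve comp a ≠ 0 := fcqResolve_nz hinv.vals ha0
    have hbnz : fcqResolve comp b ≠ 0 := fcqResolve_nz hinv.vals hb0
    by_cases hgt : size.getD (fcqResolve comp a) 1 > size.getD (fcqResolve comp b) 1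
    · -- u's class wins
      have hmerge := fcq_merge_inv (parent2 := (fcqFindC (fcqFindC parent fuel a).2 fuel b).2)
        (sizes := sizes) (m := m)
        (ns := size.getD (fcqResolve comp a) 1 + size.getD (fcqResolve comp b) 1)
        hinv.nodup hinv.vals Hfv.2 hinv.sizes_eq hidu hidv hcc hanz
      refine ⟨?_, ?_, ?_⟩
      · simp only [fcqStepA, fcqStepB, fcqUnion, hua, hvb, Hfu.1, Hfv.1, fcqResolve] at *
        simp [hcc, hsu, hsv, hgt]
      · simp only [fcqStepA, fcqStepB, fcqUnion, hua, hvb, Hfu.1, Hfv.1, fcqResolve] at *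
        simp [hcc, hsu, hsv, hgt]
      · simp only [fcqStepA, fcqStepB, fcqUnion, hua, hvb, Hfu.1, Hfv.1, fcqResolve] at *
        simp only [hcc, hsu, hsv, hgt, ite_false]
        simpa [hsu, hsv] using hmerge
    · -- v's class wins (ties included)
      have hmerge := fcq_merge_inv (parent2 := (fcqFindC (fcqFindC parent fuel a).2 fuel b).2)
        (sizes := sizes) (m := m)
        (ns := size.getD (fcqResolve comp a) 1 + size.getD (fcqResolve comp b) 1)
        hinv.nodup hinv.vals Hfv.2 hinv.sizes_eq hidv hidu (fun he => hcc he.symm) hbnz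
      refine ⟨?_, ?_, ?_⟩
      · simp only [fcqStepA, fcqStepB, fcqUnion, hua, hvb, Hfu.1, Hfv.1, fcqResolve] at *
        simp [hcc, hsu, hsv, hgt]
      · simp only [fcqStepA, fcqStepB, fcqUnion, hua, hvb, Hfu.1, Hfv.1, fcqResolve] at *
        simp [hcc, hsu, hsv, hgt]
      · simp only [fcqStepA, fcqStepB, fcqUnion, hua, hvb, Hfu.1, Hfv.1, fcqResolve] at *
        simp only [hcc, hsu, hsv, hgt, ite_false]
        simpa [hsu, hsv, Int.add_comm] using hmerge

theorem fcq_fold_eq (fuel : Nat) :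
    ∀ (rest : List (List Int)) (parent sizes comp size : PySem.Dict Int Int)
      (best : Int) (out : List Int) (m : Nat),
      FcqInv parent sizes comp size m →
      (∀ q ∈ rest, 2 ≤ q.length ∧ q.getD 0 0 ≠ 0 ∧ q.getD 1 0 ≠ 0) →
      m + rest.length < fuel →
      (rest.foldl (fcqStepA fuel) ((parent, sizes), best, out)).2.2 =
      (rest.foldl fcqStepB ((comp, size), best, out)).2.2 := by
  intro rest
  induction rest with
  | nil => intro _ _ _ _ _ _ _ _ _ _; rfl
  | cons q rest ih =>
      intro parent sizes comp size best out m hinv hpre hfuel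
      have hq := hpre q List.mem_cons_self
      have hm : m < fuel := by
        have := hfuel; simp only [List.length_cons] at this; omega
      obtain ⟨h1, h2, h3⟩ := fcq_step_eq fuel m parent sizes comp size best out q hinv hm hq
      simp only [List.foldl_cons]
      have hA : fcqStepA fuel ((parent, sizes), best, out) q =
          (((fcqStepA fuel ((parent, sizes), best, out) q).1.1,
            (fcqStepA fuel ((parent, sizes), best, out) q).1.2),
           (fcqStepA fuel ((parent, sizes), best, out) q).2.1,
           (fcqStepA fuel ((parent, sizes), best, out) q).2.2) := rfl
      have hB : fcqStepB ((comp, size), best, out) q =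
          (((fcqStepB ((comp, size), best, out) q).1.1,
            (fcqStepB ((comp, size), best, out) q).1.2),
           (fcqStepB ((comp, size), best, out) q).2.1,
           (fcqStepB ((comp, size), best, out) q).2.2) := rfl
      rw [hA, hB, h1, h2]
      exact ih _ _ _ _ _ _ (m + 1) h3
        (fun r hr => hpre r (List.mem_cons_of_mem _ hr))
        (by simp only [List.length_cons] at hfuel; omega)

-- ===== VERDICT (by name: the statement is the Claim_ definition above) =====
theorem friendCircleQueries_spec : Claim_equal_friendCircleQueries := by
  intro queries _ hpre
  unfold Spec_friendCircleQueries friendCircleQueries friendCircleQueries_alt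
  refine fcq_fold_eq (queries.length + 1) queries
    PySem.Dict.empty PySem.Dict.empty PySem.Dict.empty PySem.Dict.empty 1 [] 0
    ?_ (fun q hq => hpre q hq) (by omega)
  refine ⟨?_, ?_, ?_, ?_⟩
  · simp
  · intro x c h; simp [PySem.Dict.get?_empty] at h
  · intro x
    refine ⟨0, le_refl 0, ?_⟩
    have : fcqResolve PySem.Dict.empty x = x := by
      simp [fcqResolve, PySem.Dict.getD_empty]
    rw [this]
    exact FcqRootsTo.root x (by simp [PySem.Dict.getD_empty])
  · intro r _; rfl
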